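-- pv_equiv track=rewrite | github.com/miliar/Code_Jam_Webscraper | solutions_python/solutions_year15_round0_nr1/3687.py | getInviter
-- ===== SOURCE A (Python) =====
-- def getInviter(n, arr):
--     sum = 0
--     gap = 0
--     for x in range(0, n+1):
--         v = int(arr[x])
--         if v > 0 :
--             if sum < x :
--                gap += (x - sum)
--                sum += gap
--
--             sum += int(arr[x])
-- #        print 'x: %d | sum: %d | gap: %d' % (x, sum, gap)
--     return gap
-- ===== SOURCE B (Python) =====
-- def getInviter(n, arr):
--     # Two-pass max-of-deficit decomposition: answer = running max of x - P(x)
--     # over positions with a positive count, where P(x) sums the positive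
--     # counts before x.
--     vals = [int(arr[x]) for x in range(0, n + 1)]
--     prefixes = []
--     p = 0
--     for v in vals:
--         prefixes.append(p)
--         if v > 0:
--             p += v
--     gap = 0
--     for x, (v, p) in enumerate(zip(vals, prefixes)):
--         if v > 0 and x - p > gap:
--             gap = x - p
--     return gap
-- ===== Notes on version B (the rewrite author's own statement) =====
-- stated objective: alternative
-- what changed: B replaces A's single loop with an entangled sum/gap feedback accumulator by a two-pass max-of-deficit computation: one pass builds the positive-prefix-sum table, a second pass takes the running maximum of x - prefix[x] over positions with a positive count.
-- intended difference: On inputs whose deficit profile has three rising records (positions y<x2<x3 with positive counts, a positive deficit at y, x2's deficit beating every earlier positive position's, and x3's deficit above x2's), A's 'sum += gap' re-adds previously accumulated gap and under-counts (A returns 5 on the witness (8, ['0','1','0','0','1','0','0','0','1'])), while B returns the true maximal deficit 6, the intended number of invitations for this Standing Ovation task. — e.g. on getInviter(8, ["0", "1", "0", "0", "1", "0", "0", "0", "1"]): A returns 5, B returns 6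
import Mathlib
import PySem

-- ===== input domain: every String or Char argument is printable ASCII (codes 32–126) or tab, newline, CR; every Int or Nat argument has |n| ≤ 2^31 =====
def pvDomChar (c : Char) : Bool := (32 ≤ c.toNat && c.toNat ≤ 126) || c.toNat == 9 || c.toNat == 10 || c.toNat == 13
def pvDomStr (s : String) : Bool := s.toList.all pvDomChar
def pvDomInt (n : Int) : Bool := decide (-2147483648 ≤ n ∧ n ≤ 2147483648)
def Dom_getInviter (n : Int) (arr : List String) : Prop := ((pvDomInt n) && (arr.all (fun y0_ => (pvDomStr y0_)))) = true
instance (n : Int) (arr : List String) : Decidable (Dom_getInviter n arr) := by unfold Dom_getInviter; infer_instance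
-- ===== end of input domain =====

-- B replaces A's entangled sum/gap feedback accumulator with a two-pass
-- max-of-deficit computation; on the inputs described by D_getInviter below
-- A under-counts and B returns the intended value.

-- int(arr[x]) : shared by both ports (both Pythons compute exactly this value)
def pvVal (arr : List String) (x : Int) : Int :=
  (PySem.Int.ofStr? ((PySem.List.pyGet? arr x).getD "")).getD 0

-- ===== PORT A =====
def getInviter (n : Int) (arr : List String) : Int :=
  ((PySem.List.pyRange 0 (n + 1) 1).foldl
    (fun (st : Int × Int) x =>
      let (sum, gap) := st
      let v := pvVal arr x
      if 0 < v then
        if sum < x then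
          let gap := gap + (x - sum)
          let sum := sum + gap
          (sum + pvVal arr x, gap)
        else (sum + pvVal arr x, gap)
      else st)
    (0, 0)).2

-- ===== PORT B =====
def getInviter_alt (n : Int) (arr : List String) : Int :=
  let vals := (PySem.List.pyRange 0 (n + 1) 1).map (pvVal arr)
  let prefixes := (vals.foldl
    (fun (st : List Int × Int) v =>
      (st.1 ++ [st.2], if 0 < v then st.2 + v else st.2))
    (([] : List Int), (0 : Int))).1
  (PySem.List.enumerate (vals.zip prefixes) 0).foldl
    (fun gap e =>
      if 0 < e.2.1 ∧ gap < e.1 - e.2.2 then e.1 - e.2.2 else gap) 0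

-- ===== PRECONDITION & SPEC =====
-- A raises IndexError when n ≥ len(arr) and ValueError when some used entry
-- does not parse as an int; Pre_ excludes exactly those inputs.
def Pre_getInviter (n : Int) (arr : List String) : Prop :=
  n < (arr.length : Int) ∧ ∀ s ∈ arr.take (n + 1).toNat, (PySem.Int.ofStr? s).isSome
instance (n : Int) (arr : List String) : Decidable (Pre_getInviter n arr) := by
  unfold Pre_getInviter; infer_instance
def pvWitness_getInviter : Int × List String := (2, ["1", "0", "2"])

-- pvG z: z minus the sum of the positive counts before z, when the count at z is
-- positive (0 otherwise, also when the deficit is not positive)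
def pvG (arr : List String) (z : Nat) : Nat :=
  if 0 < pvVal arr z then z - ∑ y < z, Int.toNat (pvVal arr y) else 0

-- On inputs whose deficit profile strictly rises three times — three positions
-- y < x2 < x3 with positive counts whose positive deficits x − (positive prefix sum
-- before x) strictly increase — A's 'sum += gap' re-adds previously accumulated gap
-- and under-counts (A returns 5 on the witness), while B returns the true maximal
-- deficit (6), the intended number of invitations for this task.
def D_getInviter (n : Int) (arr : List String) : Prop :=
  ∃ x3 ≤ min n.toNat arr.length, ∃ x2 < x3, ∃ y < x2,
    0 < pvG arr y ∧ pvG arr x2 < pvG arr x3 ∧ ∀ z < x2, pvG arr z < pvG arr x2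
instance (n : Int) (arr : List String) : Decidable (D_getInviter n arr) := by
  unfold D_getInviter; infer_instance

def Spec_getInviter (n : Int) (arr : List String) (out : Int) : Prop :=
  ¬ D_getInviter n arr → out = getInviter_alt n arr
instance (n : Int) (arr : List String) (out : Int) : Decidable (Spec_getInviter n arr out) := by
  unfold Spec_getInviter; infer_instance

def pvDiffWitness_getInviter : Int × List String :=
  (8, ["0", "1", "0", "0", "1", "0", "0", "0", "1"])
def pvDiffWitnessOut_getInviter : Int × Int := (5, 6)

-- ===== CLAIM (what is proved, stated in full; the proofs are below) =====
def Claim_unchanged_getInviter : Prop := ∀ (n : Int) (arr : List String), Dom_getInviter n arr → Pre_getInviter n arr → Spec_getInviter n arr (getInviter n arr)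
def Claim_changed_getInviter : Prop := Dom_getInviter (pvDiffWitness_getInviter.1) (pvDiffWitness_getInviter.2) ∧ Pre_getInviter (pvDiffWitness_getInviter.1) (pvDiffWitness_getInviter.2) ∧ D_getInviter (pvDiffWitness_getInviter.1) (pvDiffWitness_getInviter.2) ∧ getInviter (pvDiffWitness_getInviter.1) (pvDiffWitness_getInviter.2) = pvDiffWitnessOut_getInviter.1 ∧ getInviter_alt (pvDiffWitness_getInviter.1) (pvDiffWitness_getInviter.2) = pvDiffWitnessOut_getInviter.2 ∧ pvDiffWitnessOut_getInviter.1 ≠ pvDiffWitnessOut_getInviter.2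

def Claim_exact_getInviter : Prop := ∀ (n : Int) (arr : List String), Dom_getInviter n arr → Pre_getInviter n arr → D_getInviter n arr → getInviter n arr ≠ getInviter_alt n arr

-- ===== LEMMAS AND PROOFS =====

-- A's loop, recast as structural recursion over the value list with index i
def foldA : List Int → Int → Int → Int → Int
  | [], _, _, g => g
  | v :: t, i, s, g =>
    if 0 < v then
      if s < i then foldA t (i + 1) (s + (g + (i - s)) + v) (g + (i - s))
      else foldA t (i + 1) (s + v) g
    else foldA t (i + 1) s g

-- B's second pass, recast the same way (p = positive prefix sum)
def foldB : List Int → Int → Int → Int → Int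
  | [], _, _, g => g
  | v :: t, i, p, g =>
    foldB t (i + 1) (if 0 < v then p + v else p)
      (if 0 < v ∧ g < i - p then i - p else g)

-- how often the running deficit maximum strictly rises along B's scan
def pvCnt : List Int → Int → Int → Int → Nat
  | [], _, _, _ => 0
  | v :: t, i, p, g =>
    if 0 < v then
      if g < i - p then 1 + pvCnt t (i + 1) (p + v) (i - p)
      else pvCnt t (i + 1) (p + v) g
    else pvCnt t (i + 1) p g

-- positions / prefix sums / deficits stated over the value list itself
def pvPos (vals : List Int) (z : Nat) : Prop := 0 < vals.getD z 0
def pvPsum (vals : List Int) (j : Nat) : Int := ((vals.take j).filter (fun v => 0 < v)).sum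
def pvDfn (vals : List Int) (z : Nat) : Int := (z : Int) - pvPsum vals z

-- the list Source B calls `prefixes`, with running positive prefix p
def prefList : List Int → Int → List Int
  | [], _ => []
  | v :: t, p => p :: prefList t (if 0 < v then p + v else p)

lemma prefList_spec (vals : List Int) : ∀ (acc : List Int) (p : Int),
    (vals.foldl (fun (st : List Int × Int) v =>
      (st.1 ++ [st.2], if 0 < v then st.2 + v else st.2)) (acc, p)).1
      = acc ++ prefList vals p := by
  induction vals with
  | nil => intro acc p; simp [prefList]
  | cons v t ih =>
      intro acc p
      simp only [List.foldl_cons, prefList]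
      rw [ih]
      simp

lemma bridgeB_fold (vals : List Int) : ∀ (i p g : Int),
    (PySem.List.enumerate (vals.zip (prefList vals p)) i).foldl
      (fun gap e => if 0 < e.2.1 ∧ gap < e.1 - e.2.2 then e.1 - e.2.2 else gap) g
    = foldB vals i p g := by
  induction vals with
  | nil => intro i p g; simp [prefList, foldB, PySem.List.enumerate_nil]
  | cons v t ih =>
      intro i p g
      simp only [prefList, List.zip_cons_cons, PySem.List.enumerate_cons,
        List.foldl_cons, foldB]
      exact ih (i + 1) _ _

lemma bridgeA (arr : List String) : ∀ (m : Nat) (a s g : Int),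
    ((PySem.List.pyRange a (a + (m : Int)) 1).foldl
      (fun (st : Int × Int) x =>
        let (sum, gap) := st
        let v := pvVal arr x
        if 0 < v then
          if sum < x then
            let gap := gap + (x - sum)
            let sum := sum + gap
            (sum + pvVal arr x, gap)
          else (sum + pvVal arr x, gap)
        else st) (s, g)).2
    = foldA ((PySem.List.pyRange a (a + (m : Int)) 1).map (pvVal arr)) a s g := by
  intro m
  induction m with
  | zero =>
      intro a s g
      rw [PySem.List.pyRange_one_eq_nil (by omega)]
      rfl
  | succ m ih =>
      intro a s g
      have hlt : a < a + ((m + 1 : Nat) : Int) := by push_cast; omega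
      rw [PySem.List.pyRange_one_cons hlt]
      have he : a + ((m + 1 : Nat) : Int) = (a + 1) + (m : Int) := by push_cast; ring
      rw [he]
      simp only [List.foldl_cons, List.map_cons, foldA]
      by_cases hv : 0 < pvVal arr a
      · by_cases hs : s < a
        · simp only [hv, hs, if_true]
          exact ih (a + 1) _ _
        · simp only [hv, hs, if_true, if_false]
          exact ih (a + 1) _ _
      · simp only [hv, if_false]
        exact ih (a + 1) _ _

-- main invariant: A's state (s, g) and B's state (p, g) stay linked while the
-- deficit maximum has risen at most twice in total
lemma main_inv (vals : List Int) : ∀ (i s p g : Int) (k : Nat),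
    ((k = 0 ∧ s = p ∧ g = 0) ∨ (k = 1 ∧ s = p + g ∧ 0 < g) ∨ (2 ≤ k ∧ g < s - p)) →
    k + pvCnt vals i p g ≤ 2 →
    foldA vals i s g = foldB vals i p g := by
  induction vals with
  | nil => intro i s p g k _ _; rfl
  | cons v t ih =>
      intro i s p g k hinv hcnt
      simp only [foldA, foldB, pvCnt] at *
      by_cases hv : 0 < v
      · rcases hinv with ⟨hk, hs, hg⟩ | ⟨hk, hs, hg⟩ | ⟨hk, hg⟩
        · -- k = 0 : s = p, g = 0
          by_cases hB : g < i - p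
          · have hA : s < i := by omega
            simp only [if_pos hv, if_pos hA, if_pos hB,
              if_pos (show 0 < v ∧ g < i - p from ⟨hv, hB⟩)] at hcnt ⊢
            rw [show g + (i - s) = i - p from by omega]
            exact ih (i + 1) _ _ _ 1
              (Or.inr (Or.inl ⟨rfl, by omega, by omega⟩)) (by omega)
          · have hA : ¬ s < i := by omega
            simp only [if_pos hv, if_neg hA, if_neg hB,
              if_neg (show ¬ (0 < v ∧ g < i - p) from fun h => hB h.2)] at hcnt ⊢
            exact ih (i + 1) _ _ _ 0 (Or.inl ⟨rfl, by omega, hg⟩) (by omega)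
        · -- k = 1 : s = p + g, 0 < g
          by_cases hB : g < i - p
          · have hA : s < i := by omega
            simp only [if_pos hv, if_pos hA, if_pos hB,
              if_pos (show 0 < v ∧ g < i - p from ⟨hv, hB⟩)] at hcnt ⊢
            rw [show g + (i - s) = i - p from by omega]
            exact ih (i + 1) _ _ _ 2
              (Or.inr (Or.inr ⟨le_refl 2, by omega⟩)) (by omega)
          · have hA : ¬ s < i := by omega
            simp only [if_pos hv, if_neg hA, if_neg hB,
              if_neg (show ¬ (0 < v ∧ g < i - p) from fun h => hB h.2)] at hcnt ⊢
            exact ih (i + 1) _ _ _ 1 (Or.inr (Or.inl ⟨rfl, by omega, hg⟩)) (by omega)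
        · -- 2 ≤ k : g < s - p; the deficit maximum cannot rise again
          by_cases hB : g < i - p
          · simp only [if_pos hv, if_pos hB] at hcnt
            omega
          · have hA : ¬ s < i := by omega
            simp only [if_pos hv, if_neg hA, if_neg hB,
              if_neg (show ¬ (0 < v ∧ g < i - p) from fun h => hB h.2)] at hcnt ⊢
            exact ih (i + 1) _ _ _ k (Or.inr (Or.inr ⟨hk, by omega⟩)) (by omega)
      · simp only [if_neg hv,
          if_neg (show ¬ (0 < v ∧ g < i - p) from fun h => hv h.1)] at hcnt ⊢
        exact ih (i + 1) _ _ _ k hinv hcnt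

-- facts about one step: vals.drop j = v :: t
lemma drop_facts (vals : List Int) (j : Nat) (v : Int) (t : List Int)
    (h : vals.drop j = v :: t) :
    j < vals.length ∧ vals.getD j 0 = v ∧ vals.drop (j + 1) = t ∧
      pvPsum vals (j + 1) = pvPsum vals j + (if 0 < v then v else 0) := by
  have hj : j < vals.length := by
    by_contra hc
    rw [List.drop_eq_nil_of_le (by omega)] at h
    simp at h
  have hget : vals[j]? = some v := by
    have h0 : (vals.drop j)[0]? = some v := by rw [h]; rfl
    rwa [List.getElem?_drop, Nat.add_zero] at h0
  have hgd : vals.getD j 0 = v := by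
    simp [List.getD, hget]
  have ht : vals.drop (j + 1) = t := by
    rw [← List.tail_drop, h]
    rfl
  refine ⟨hj, hgd, ht, ?_⟩
  unfold pvPsum
  rw [List.take_add_one, hget]
  simp only [Option.toList_some, List.filter_append, List.sum_append]
  by_cases hb : 0 < v
  · simp [hb]
  · simp [hb]

-- one more record exists in the suffix
lemma rec1 (vals : List Int) : ∀ (tail : List Int) (j : Nat) (g : Int),
    vals.drop j = tail → 1 ≤ pvCnt tail (j : Int) (pvPsum vals j) g →
    ∃ x, j ≤ x ∧ x < vals.length ∧ pvPos vals x ∧ g < pvDfn vals x := by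
  intro tail
  induction tail with
  | nil => intro j g _ hc; simp [pvCnt] at hc
  | cons v t ih =>
      intro j g hdrop hc
      obtain ⟨hj, hv, ht, hps⟩ := drop_facts vals j v t hdrop
      have hcast : (j : Int) + 1 = ((j + 1 : Nat) : Int) := by push_cast; ring
      simp only [pvCnt] at hc
      by_cases hpos : 0 < v
      · by_cases hrec : g < (j : Int) - pvPsum vals j
        · exact ⟨j, le_refl j, hj, by unfold pvPos; rw [hv]; exact hpos,
            by unfold pvDfn; exact hrec⟩
        · rw [if_pos hpos, if_neg hrec, hcast] at hc
          rw [show pvPsum vals j + v = pvPsum vals (j + 1) from by rw [hps, if_pos hpos]] at hc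
          obtain ⟨x, hx1, hx2, hx3, hx4⟩ := ih (j + 1) g ht hc
          exact ⟨x, by omega, hx2, hx3, hx4⟩
      · rw [if_neg hpos, hcast] at hc
        rw [show pvPsum vals j = pvPsum vals (j + 1) from by rw [hps, if_neg hpos]; ring] at hc
        obtain ⟨x, hx1, hx2, hx3, hx4⟩ := ih (j + 1) g ht hc
        exact ⟨x, by omega, hx2, hx3, hx4⟩

-- two more records exist in the suffix; x2 is the first of them
lemma rec2 (vals : List Int) : ∀ (tail : List Int) (j : Nat) (g : Int),
    vals.drop j = tail → 2 ≤ pvCnt tail (j : Int) (pvPsum vals j) g →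
    ∃ x2 x3, j ≤ x2 ∧ x2 < x3 ∧ x3 < vals.length ∧ pvPos vals x2 ∧ pvPos vals x3 ∧
      g < pvDfn vals x2 ∧ pvDfn vals x2 < pvDfn vals x3 ∧
      (∀ z, j ≤ z → z < x2 → pvPos vals z → pvDfn vals z ≤ g) := by
  intro tail
  induction tail with
  | nil => intro j g _ hc; simp [pvCnt] at hc
  | cons v t ih =>
      intro j g hdrop hc
      obtain ⟨hj, hv, ht, hps⟩ := drop_facts vals j v t hdrop
      have hcast : (j : Int) + 1 = ((j + 1 : Nat) : Int) := by push_cast; ring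
      simp only [pvCnt] at hc
      by_cases hpos : 0 < v
      · by_cases hrec : g < (j : Int) - pvPsum vals j
        · rw [if_pos hpos, if_pos hrec, hcast] at hc
          rw [show pvPsum vals j + v = pvPsum vals (j + 1) from by rw [hps, if_pos hpos]] at hc
          obtain ⟨x3, hx1, hx2', hx3, hx4⟩ :=
            rec1 vals t (j + 1) ((j : Int) - pvPsum vals j) ht (by omega)
          refine ⟨j, x3, le_refl j, by omega, hx2',
            by unfold pvPos; rw [hv]; exact hpos, hx3, ?_, ?_, ?_⟩
          · unfold pvDfn; exact hrec
          · have hd : pvDfn vals j = (j : Int) - pvPsum vals j := rfl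
            omega
          · intro z hz1 hz2 _; omega
        · rw [if_pos hpos, if_neg hrec, hcast] at hc
          rw [show pvPsum vals j + v = pvPsum vals (j + 1) from by rw [hps, if_pos hpos]] at hc
          obtain ⟨x2, x3, h1, h2, h3, h4, h5, h6, h7, h8⟩ := ih (j + 1) g ht hc
          refine ⟨x2, x3, by omega, h2, h3, h4, h5, h6, h7, ?_⟩
          intro z hz1 hz2 hz3
          rcases Nat.eq_or_lt_of_le hz1 with he | hlt
          · rw [← he]
            have hd : pvDfn vals j = (j : Int) - pvPsum vals j := rfl
            omega
          · exact h8 z hlt hz2 hz3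
      · rw [if_neg hpos, hcast] at hc
        rw [show pvPsum vals j = pvPsum vals (j + 1) from by rw [hps, if_neg hpos]; ring] at hc
        obtain ⟨x2, x3, h1, h2, h3, h4, h5, h6, h7, h8⟩ := ih (j + 1) g ht hc
        refine ⟨x2, x3, by omega, h2, h3, h4, h5, h6, h7, ?_⟩
        intro z hz1 hz2 hz3
        rcases Nat.eq_or_lt_of_le hz1 with he | hlt
        · rw [← he] at hz3
          unfold pvPos at hz3
          rw [hv] at hz3
          omega
        · exact h8 z hlt hz2 hz3

-- three more records exist in the suffix; y is the first of them
lemma rec3 (vals : List Int) : ∀ (tail : List Int) (j : Nat) (g : Int),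
    vals.drop j = tail → 3 ≤ pvCnt tail (j : Int) (pvPsum vals j) g →
    ∃ y x2 x3, j ≤ y ∧ y < x2 ∧ x2 < x3 ∧ x3 < vals.length ∧
      pvPos vals y ∧ pvPos vals x2 ∧ pvPos vals x3 ∧
      g < pvDfn vals y ∧ pvDfn vals y < pvDfn vals x2 ∧ pvDfn vals x2 < pvDfn vals x3 ∧
      (∀ z, j ≤ z → z < x2 → pvPos vals z → pvDfn vals z ≤ pvDfn vals y) := by
  intro tail
  induction tail with
  | nil => intro j g _ hc; simp [pvCnt] at hc
  | cons v t ih =>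
      intro j g hdrop hc
      obtain ⟨hj, hv, ht, hps⟩ := drop_facts vals j v t hdrop
      have hcast : (j : Int) + 1 = ((j + 1 : Nat) : Int) := by push_cast; ring
      simp only [pvCnt] at hc
      by_cases hpos : 0 < v
      · by_cases hrec : g < (j : Int) - pvPsum vals j
        · rw [if_pos hpos, if_pos hrec, hcast] at hc
          rw [show pvPsum vals j + v = pvPsum vals (j + 1) from by rw [hps, if_pos hpos]] at hc
          obtain ⟨x2, x3, h1, h2, h3, h4, h5, h6, h7, h8⟩ :=
            rec2 vals t (j + 1) ((j : Int) - pvPsum vals j) ht (by omega)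
          refine ⟨j, x2, x3, le_refl j, by omega, h2, h3,
            by unfold pvPos; rw [hv]; exact hpos, h4, h5,
            by unfold pvDfn; exact hrec,
            by have hd : pvDfn vals j = (j : Int) - pvPsum vals j := rfl; omega, h7, ?_⟩
          intro z hz1 hz2 hz3
          rcases Nat.eq_or_lt_of_le hz1 with he | hlt
          · rw [← he]
          · have := h8 z hlt hz2 hz3
            have hd : pvDfn vals j = (j : Int) - pvPsum vals j := rfl
            omega
        · rw [if_pos hpos, if_neg hrec, hcast] at hc
          rw [show pvPsum vals j + v = pvPsum vals (j + 1) from by rw [hps, if_pos hpos]] at hc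
          obtain ⟨y, x2, x3, h0, h1, h2, h3, h4, h5, h6, h7, h8, h9, h10⟩ := ih (j + 1) g ht hc
          refine ⟨y, x2, x3, by omega, h1, h2, h3, h4, h5, h6, h7, h8, h9, ?_⟩
          intro z hz1 hz2 hz3
          rcases Nat.eq_or_lt_of_le hz1 with he | hlt
          · rw [← he]
            have hd : pvDfn vals j = (j : Int) - pvPsum vals j := rfl
            omega
          · exact h10 z hlt hz2 hz3
      · rw [if_neg hpos, hcast] at hc
        rw [show pvPsum vals j = pvPsum vals (j + 1) from by rw [hps, if_neg hpos]; ring] at hc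
        obtain ⟨y, x2, x3, h0, h1, h2, h3, h4, h5, h6, h7, h8, h9, h10⟩ := ih (j + 1) g ht hc
        refine ⟨y, x2, x3, by omega, h1, h2, h3, h4, h5, h6, h7, h8, h9, ?_⟩
        intro z hz1 hz2 hz3
        rcases Nat.eq_or_lt_of_le hz1 with he | hlt
        · rw [← he] at hz3
          unfold pvPos at hz3
          rw [hv] at hz3
          omega
        · exact h10 z hlt hz2 hz3

-- the value list of this task, and its bridge to pvVal / pvDef
lemma vals_eq (arr : List String) (n : Int) :
    (PySem.List.pyRange 0 (n + 1) 1).map (pvVal arr)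
      = (List.range (n + 1).toNat).map (fun y => pvVal arr (Int.ofNat y)) := by
  rw [PySem.List.pyRange_one, List.map_map, sub_zero]
  exact List.map_congr_left (fun k _ => by simp [Function.comp, Int.ofNat_eq_natCast])

lemma vals_getD (arr : List String) (n : Int) (z : Nat)
    (hz : z < ((PySem.List.pyRange 0 (n + 1) 1).map (pvVal arr)).length) :
    ((PySem.List.pyRange 0 (n + 1) 1).map (pvVal arr)).getD z 0 = pvVal arr (z : Int) := by
  rw [vals_eq] at hz ⊢
  simp only [List.length_map, List.length_range] at hz
  rw [List.getD_eq_getElem?_getD, List.getElem?_map, List.getElem?_range hz]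
  simp [Int.ofNat_eq_natCast]

lemma psum_nat (arr : List String) (n : Int) : ∀ (z : Nat), z ≤ (n + 1).toNat →
    pvPsum ((PySem.List.pyRange 0 (n + 1) 1).map (pvVal arr)) z
      = (((∑ y ∈ Finset.range z, Int.toNat (pvVal arr (y : Int))) : Nat) : Int) := by
  intro z
  induction z with
  | zero => intro _; simp [pvPsum]
  | succ z ih =>
      intro hz
      have hlen : ((PySem.List.pyRange 0 (n + 1) 1).map (pvVal arr)).length = (n + 1).toNat := by
        rw [List.length_map, PySem.List.length_pyRange_one]; norm_num
      have hzl : z < ((PySem.List.pyRange 0 (n + 1) 1).map (pvVal arr)).length := by omega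
      have hdrop : ((PySem.List.pyRange 0 (n + 1) 1).map (pvVal arr)).drop z
          = ((PySem.List.pyRange 0 (n + 1) 1).map (pvVal arr))[z] :: ((PySem.List.pyRange 0 (n + 1) 1).map (pvVal arr)).drop (z + 1) :=
        List.drop_eq_getElem_cons hzl
      obtain ⟨_, hgd, _, hps⟩ := drop_facts _ z _ _ hdrop
      have hval : ((PySem.List.pyRange 0 (n + 1) 1).map (pvVal arr))[z] = pvVal arr (z : Int) := by
        have h1 := vals_getD arr n z hzl
        rwa [List.getD_eq_getElem?_getD, List.getElem?_eq_getElem hzl, Option.getD_some] at h1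
      rw [hps, ih (by omega), Finset.sum_range_succ, hval]
      have hmax : (if 0 < pvVal arr (z : Int) then pvVal arr (z : Int) else 0)
          = (Int.toNat (pvVal arr (z : Int)) : Int) := by
        split_ifs <;> omega
      rw [hmax]
      push_cast
      ring

lemma pvVal_pos_lt (arr : List String) (x : Nat) (h : 0 < pvVal arr (x : Int)) :
    x < arr.length := by
  by_contra hc
  have hnone : PySem.List.pyGet? arr (x : Int) = none := by
    rw [PySem.List.pyGet?_eq_none_iff]
    intro hin
    unfold PySem.Raise.InRange at hin
    omega
  unfold pvVal at h
  rw [hnone] at h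
  have h0 : (PySem.Int.ofStr? ((none : Option String).getD "")).getD 0 = (0 : Int) := by decide
  omega

lemma pvG_dfn (n : Int) (arr : List String) (x : Nat)
    (hx : x < ((PySem.List.pyRange 0 (n + 1) 1).map (pvVal arr)).length)
    (hpx : 0 < pvVal arr (x : Int)) :
    (pvG arr x : Int) = Int.toNat (pvDfn ((PySem.List.pyRange 0 (n + 1) 1).map (pvVal arr)) x) := by
  have hlen : ((PySem.List.pyRange 0 (n + 1) 1).map (pvVal arr)).length = (n + 1).toNat := by
    rw [List.length_map, PySem.List.length_pyRange_one]; norm_num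
  unfold pvG pvDfn
  rw [if_pos hpx, Nat.Iio_eq_range, psum_nat arr n x (by omega)]
  omega

set_option maxHeartbeats 2000000 in
lemma cnt_imp_D (n : Int) (arr : List String)
    (h : 3 ≤ pvCnt ((PySem.List.pyRange 0 (n + 1) 1).map (pvVal arr)) 0 0 0) :
    D_getInviter n arr := by
  have hlen : ((PySem.List.pyRange 0 (n + 1) 1).map (pvVal arr)).length = (n + 1).toNat := by
    rw [List.length_map, PySem.List.length_pyRange_one]; norm_num
  have h0 : pvPsum ((PySem.List.pyRange 0 (n + 1) 1).map (pvVal arr)) 0 = 0 := rfl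
  obtain ⟨y, x2, x3, h1, h2, h3, h4, h5, h6, h7, h8, h9, h10, h11⟩ :=
    rec3 ((PySem.List.pyRange 0 (n + 1) 1).map (pvVal arr)) ((PySem.List.pyRange 0 (n + 1) 1).map (pvVal arr)) 0 0 rfl (by rw [h0]; exact_mod_cast h)
  have hpy : 0 < pvVal arr (y : Int) := by
    unfold pvPos at h5; rwa [vals_getD arr n y (by omega)] at h5
  have hp2 : 0 < pvVal arr (x2 : Int) := by
    unfold pvPos at h6; rwa [vals_getD arr n x2 (by omega)] at h6
  have hp3 : 0 < pvVal arr (x3 : Int) := by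
    unfold pvPos at h7; rwa [vals_getD arr n x3 (by omega)] at h7
  have hg := pvG_dfn n arr
  have hgy := hg y (by omega) hpy
  have hg2 := hg x2 (by omega) hp2
  have hg3 := hg x3 (by omega) hp3
  have hb : x3 ≤ min n.toNat arr.length := by
    have := pvVal_pos_lt arr x3 hp3
    omega
  refine ⟨x3, hb, x2, h3, y, h2, by omega, by omega, ?_⟩
  intro z hz
  by_cases hpz : 0 < pvVal arr (z : Int)
  · have hgz := hg z (by omega) hpz
    have hposz : pvPos ((PySem.List.pyRange 0 (n + 1) 1).map (pvVal arr)) z := by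
      unfold pvPos; rw [vals_getD arr n z (by omega)]; exact hpz
    have := h11 z (Nat.zero_le z) hz hposz
    omega
  · have h0z : pvG arr z = 0 := by unfold pvG; rw [if_neg hpz]
    omega


-- one rise happens while a not-yet-dominated record r lies ahead
lemma cnt1R (vals : List Int) : ∀ (tail : List Int) (j : Nat) (g : Int) (r : Nat),
    vals.drop j = tail → j ≤ r → r < vals.length → pvPos vals r → g < pvDfn vals r →
    1 ≤ pvCnt tail (j : Int) (pvPsum vals j) g := by
  intro tail
  induction tail with
  | nil =>
      intro j g r hdrop hjr hrl _ _
      have hlen := congrArg List.length hdrop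
      simp [List.length_drop] at hlen
      omega
  | cons v t ih =>
      intro j g r hdrop hjr hrl hpr hgr
      obtain ⟨hj, hv, ht, hps⟩ := drop_facts vals j v t hdrop
      have hcast : (j : Int) + 1 = ((j + 1 : Nat) : Int) := by push_cast; ring
      simp only [pvCnt]
      have hd : pvDfn vals j = (j : Int) - pvPsum vals j := rfl
      rcases Nat.eq_or_lt_of_le hjr with he | hlt
      · subst he
        have hpos : 0 < v := by unfold pvPos at hpr; rw [hv] at hpr; exact hpr
        rw [if_pos hpos, if_pos (show g < (j : Int) - pvPsum vals j from by omega)]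
        omega
      · by_cases hpos : 0 < v
        · by_cases hrise : g < (j : Int) - pvPsum vals j
          · rw [if_pos hpos, if_pos hrise]
            omega
          · rw [if_pos hpos, if_neg hrise, hcast,
              show pvPsum vals j + v = pvPsum vals (j + 1) from by rw [hps, if_pos hpos]]
            exact ih (j + 1) g r ht (by omega) hrl hpr hgr
        · rw [if_neg hpos, hcast,
            show pvPsum vals j = pvPsum vals (j + 1) from by rw [hps, if_neg hpos]; ring]
          exact ih (j + 1) g r ht (by omega) hrl hpr hgr

-- two rises happen while records r2 < r3 lie ahead
lemma cnt2R (vals : List Int) : ∀ (tail : List Int) (j : Nat) (g : Int) (r2 r3 : Nat),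
    vals.drop j = tail → j ≤ r2 → r2 < r3 → r3 < vals.length →
    pvPos vals r2 → pvPos vals r3 → g < pvDfn vals r2 →
    (∀ w, w < r2 → pvPos vals w → pvDfn vals w < pvDfn vals r2) →
    (∀ w, w < r3 → pvPos vals w → pvDfn vals w < pvDfn vals r3) →
    2 ≤ pvCnt tail (j : Int) (pvPsum vals j) g := by
  intro tail
  induction tail with
  | nil =>
      intro j g r2 r3 hdrop hjr _ hrl _ _ _ _ _
      have hlen := congrArg List.length hdrop
      simp [List.length_drop] at hlen
      omega
  | cons v t ih =>
      intro j g r2 r3 hdrop hjr h23 hrl hp2 hp3 hgr hrec2 hrec3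
      obtain ⟨hj, hv, ht, hps⟩ := drop_facts vals j v t hdrop
      have hcast : (j : Int) + 1 = ((j + 1 : Nat) : Int) := by push_cast; ring
      simp only [pvCnt]
      have hd : pvDfn vals j = (j : Int) - pvPsum vals j := rfl
      rcases Nat.eq_or_lt_of_le hjr with he | hlt
      · subst he
        have hpos : 0 < v := by unfold pvPos at hp2; rw [hv] at hp2; exact hp2
        rw [if_pos hpos, if_pos (show g < (j : Int) - pvPsum vals j from by omega), hcast,
          show pvPsum vals j + v = pvPsum vals (j + 1) from by rw [hps, if_pos hpos]]
        have h1 := cnt1R vals t (j + 1) ((j : Int) - pvPsum vals j) r3 ht (by omega) hrl hp3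
          (by have := hrec3 j h23 hp2; omega)
        omega
      · by_cases hpos : 0 < v
        · by_cases hrise : g < (j : Int) - pvPsum vals j
          · rw [if_pos hpos, if_pos hrise, hcast,
              show pvPsum vals j + v = pvPsum vals (j + 1) from by rw [hps, if_pos hpos]]
            have hposj : pvPos vals j := by unfold pvPos; rw [hv]; exact hpos
            have h1 := cnt1R vals t (j + 1) ((j : Int) - pvPsum vals j) r2 ht (by omega)
              (by omega) hp2 (by have := hrec2 j hlt hposj; omega)
            omega
          · rw [if_pos hpos, if_neg hrise, hcast,
              show pvPsum vals j + v = pvPsum vals (j + 1) from by rw [hps, if_pos hpos]]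
            exact ih (j + 1) g r2 r3 ht (by omega) h23 hrl hp2 hp3 hgr hrec2 hrec3
        · rw [if_neg hpos, hcast,
            show pvPsum vals j = pvPsum vals (j + 1) from by rw [hps, if_neg hpos]; ring]
          exact ih (j + 1) g r2 r3 ht (by omega) h23 hrl hp2 hp3 hgr hrec2 hrec3

-- three rises happen while records r1 < r2 < r3 lie ahead
lemma cnt3R (vals : List Int) : ∀ (tail : List Int) (j : Nat) (g : Int) (r1 r2 r3 : Nat),
    vals.drop j = tail → j ≤ r1 → r1 < r2 → r2 < r3 → r3 < vals.length →
    pvPos vals r1 → pvPos vals r2 → pvPos vals r3 → g < pvDfn vals r1 →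
    (∀ w, w < r1 → pvPos vals w → pvDfn vals w < pvDfn vals r1) →
    (∀ w, w < r2 → pvPos vals w → pvDfn vals w < pvDfn vals r2) →
    (∀ w, w < r3 → pvPos vals w → pvDfn vals w < pvDfn vals r3) →
    3 ≤ pvCnt tail (j : Int) (pvPsum vals j) g := by
  intro tail
  induction tail with
  | nil =>
      intro j g r1 r2 r3 hdrop hjr _ _ hrl _ _ _ _ _ _ _
      have hlen := congrArg List.length hdrop
      simp [List.length_drop] at hlen
      omega
  | cons v t ih =>
      intro j g r1 r2 r3 hdrop hjr h12 h23 hrl hp1 hp2 hp3 hgr hrec1 hrec2 hrec3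
      obtain ⟨hj, hv, ht, hps⟩ := drop_facts vals j v t hdrop
      have hcast : (j : Int) + 1 = ((j + 1 : Nat) : Int) := by push_cast; ring
      simp only [pvCnt]
      have hd : pvDfn vals j = (j : Int) - pvPsum vals j := rfl
      rcases Nat.eq_or_lt_of_le hjr with he | hlt
      · subst he
        have hpos : 0 < v := by unfold pvPos at hp1; rw [hv] at hp1; exact hp1
        rw [if_pos hpos, if_pos (show g < (j : Int) - pvPsum vals j from by omega), hcast,
          show pvPsum vals j + v = pvPsum vals (j + 1) from by rw [hps, if_pos hpos]]
        have h2 := cnt2R vals t (j + 1) ((j : Int) - pvPsum vals j) r2 r3 ht (by omega) h23 hrl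
          hp2 hp3 (by have := hrec2 j h12 hp1; omega) hrec2 hrec3
        omega
      · by_cases hpos : 0 < v
        · by_cases hrise : g < (j : Int) - pvPsum vals j
          · rw [if_pos hpos, if_pos hrise, hcast,
              show pvPsum vals j + v = pvPsum vals (j + 1) from by rw [hps, if_pos hpos]]
            have hposj : pvPos vals j := by unfold pvPos; rw [hv]; exact hpos
            have hj1 : pvDfn vals j < pvDfn vals r1 := hrec1 j hlt hposj
            have hj2 : pvDfn vals r1 < pvDfn vals r2 := hrec2 r1 h12 hp1
            have h2 := cnt2R vals t (j + 1) ((j : Int) - pvPsum vals j) r2 r3 ht (by omega) h23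
              hrl hp2 hp3 (by omega) hrec2 hrec3
            omega
          · rw [if_pos hpos, if_neg hrise, hcast,
              show pvPsum vals j + v = pvPsum vals (j + 1) from by rw [hps, if_pos hpos]]
            exact ih (j + 1) g r1 r2 r3 ht (by omega) h12 h23 hrl hp1 hp2 hp3 hgr hrec1 hrec2 hrec3
        · rw [if_neg hpos, hcast,
            show pvPsum vals j = pvPsum vals (j + 1) from by rw [hps, if_neg hpos]; ring]
          exact ih (j + 1) g r1 r2 r3 ht (by omega) h12 h23 hrl hp1 hp2 hp3 hgr hrec1 hrec2 hrec3

-- any position strictly above a threshold is dominated by some record above it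
lemma exrec (vals : List Int) : ∀ (z : Nat) (c : Int), pvPos vals z → c < pvDfn vals z →
    ∃ r, r ≤ z ∧ pvPos vals r ∧ c < pvDfn vals r ∧
      ∀ w, w < r → pvPos vals w → pvDfn vals w < pvDfn vals r := by
  intro z
  induction z using Nat.strong_induction_on with
  | _ z ih =>
      intro c hp hd
      by_cases hrec : ∀ w, w < z → pvPos vals w → pvDfn vals w < pvDfn vals z
      · exact ⟨z, le_refl _, hp, hd, hrec⟩
      · push_neg at hrec
        obtain ⟨w, hw, hpw, hdw⟩ := hrec
        obtain ⟨r, hr1, hr2, hr3, hr4⟩ := ih w hw c hpw (by omega)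
        exact ⟨r, by omega, hr2, hr3, hr4⟩

-- once A's gap is strictly behind B's (and B's gap is covered by A's inflation), it stays behind
lemma p3lt (vals : List Int) : ∀ (i s p gA gB : Int),
    0 ≤ gA → gA < gB → gB ≤ s - p → foldA vals i s gA < foldB vals i p gB := by
  induction vals with
  | nil => intro i s p gA gB _ h _; exact h
  | cons v t ih =>
      intro i s p gA gB h0 hlt hcov
      simp only [foldA, foldB]
      by_cases hv : 0 < v
      · by_cases hrise : gB < i - p
        · by_cases hA : s < i
          · simp only [if_pos hv, if_pos hA,
              if_pos (show 0 < v ∧ gB < i - p from ⟨hv, hrise⟩)]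
            exact ih (i + 1) _ _ _ _ (by omega) (by omega) (by omega)
          · simp only [if_pos hv, if_neg hA,
              if_pos (show 0 < v ∧ gB < i - p from ⟨hv, hrise⟩)]
            exact ih (i + 1) _ _ _ _ h0 (by omega) (by omega)
        · have hA : ¬ s < i := by omega
          simp only [if_pos hv, if_neg hA,
            if_neg (show ¬ (0 < v ∧ gB < i - p) from fun h => hrise h.2)]
          exact ih (i + 1) _ _ _ _ h0 hlt (by omega)
      · simp only [if_neg hv,
          if_neg (show ¬ (0 < v ∧ gB < i - p) from fun h => hv h.1)]
        exact ih (i + 1) _ _ _ _ h0 hlt hcov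

-- with three rises still to come, A's result falls strictly behind B's
lemma ltdiv (vals : List Int) : ∀ (i s p g : Int) (k : Nat),
    ((k = 0 ∧ s = p ∧ g = 0) ∨ (k = 1 ∧ s = p + g ∧ 0 < g) ∨ (k = 2 ∧ 0 ≤ g ∧ g < s - p)) →
    3 ≤ k + pvCnt vals i p g →
    foldA vals i s g < foldB vals i p g := by
  induction vals with
  | nil =>
      intro i s p g k hinv hcnt
      simp only [pvCnt] at hcnt
      rcases hinv with ⟨hk, _, _⟩ | ⟨hk, _, _⟩ | ⟨hk, _, _⟩ <;> omega
  | cons v t ih =>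
      intro i s p g k hinv hcnt
      simp only [foldA, foldB, pvCnt] at *
      by_cases hv : 0 < v
      · rcases hinv with ⟨hk, hs, hg⟩ | ⟨hk, hs, hg⟩ | ⟨hk, hg0, hg⟩
        · by_cases hB : g < i - p
          · have hA : s < i := by omega
            simp only [if_pos hv, if_pos hA, if_pos hB,
              if_pos (show 0 < v ∧ g < i - p from ⟨hv, hB⟩)] at hcnt ⊢
            rw [show g + (i - s) = i - p from by omega]
            exact ih (i + 1) _ _ _ 1
              (Or.inr (Or.inl ⟨rfl, by omega, by omega⟩)) (by omega)
          · have hA : ¬ s < i := by omega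
            simp only [if_pos hv, if_neg hA, if_neg hB,
              if_neg (show ¬ (0 < v ∧ g < i - p) from fun h => hB h.2)] at hcnt ⊢
            exact ih (i + 1) _ _ _ 0 (Or.inl ⟨rfl, by omega, hg⟩) (by omega)
        · by_cases hB : g < i - p
          · have hA : s < i := by omega
            simp only [if_pos hv, if_pos hA, if_pos hB,
              if_pos (show 0 < v ∧ g < i - p from ⟨hv, hB⟩)] at hcnt ⊢
            rw [show g + (i - s) = i - p from by omega]
            exact ih (i + 1) _ _ _ 2
              (Or.inr (Or.inr ⟨rfl, by omega, by omega⟩)) (by omega)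
          · have hA : ¬ s < i := by omega
            simp only [if_pos hv, if_neg hA, if_neg hB,
              if_neg (show ¬ (0 < v ∧ g < i - p) from fun h => hB h.2)] at hcnt ⊢
            exact ih (i + 1) _ _ _ 1 (Or.inr (Or.inl ⟨rfl, by omega, hg⟩)) (by omega)
        · by_cases hB : g < i - p
          · by_cases hA : s < i
            · simp only [if_pos hv, if_pos hA, if_pos hB,
                if_pos (show 0 < v ∧ g < i - p from ⟨hv, hB⟩)] at hcnt ⊢
              exact p3lt _ (i + 1) _ _ _ _ (by omega) (by omega) (by omega)
            · simp only [if_pos hv, if_neg hA, if_pos hB,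
                if_pos (show 0 < v ∧ g < i - p from ⟨hv, hB⟩)] at hcnt ⊢
              exact p3lt _ (i + 1) _ _ _ _ (by omega) (by omega) (by omega)
          · have hA : ¬ s < i := by omega
            simp only [if_pos hv, if_neg hA, if_neg hB,
              if_neg (show ¬ (0 < v ∧ g < i - p) from fun h => hB h.2)] at hcnt ⊢
            exact ih (i + 1) _ _ _ 2 (Or.inr (Or.inr ⟨rfl, by omega, by omega⟩)) (by omega)
      · simp only [if_neg hv,
          if_neg (show ¬ (0 < v ∧ g < i - p) from fun h => hv h.1)] at hcnt ⊢
        exact ih (i + 1) _ _ _ k hinv hcnt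

-- ===== VERDICT (by name: the statement is the Claim_ definition above) =====
theorem getInviter_spec : Claim_unchanged_getInviter := by
  intro n arr _ _ hD
  have hcnt : pvCnt ((PySem.List.pyRange 0 (n + 1) 1).map (pvVal arr)) 0 0 0 ≤ 2 := by
    by_contra hcon
    exact hD (cnt_imp_D n arr (by omega))
  by_cases hn : 0 ≤ n + 1
  · obtain ⟨m, hm⟩ : ∃ m : Nat, n + 1 = 0 + (m : Int) := ⟨(n + 1).toNat, by omega⟩
    simp only [getInviter, getInviter_alt]
    rw [hm] at hcnt ⊢
    rw [bridgeA arr m 0 0 0]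
    rw [prefList_spec, List.nil_append, bridgeB_fold]
    exact main_inv _ 0 0 0 0 0 (Or.inl ⟨rfl, rfl, rfl⟩) (by omega)
  · simp only [getInviter, getInviter_alt]
    rw [PySem.List.pyRange_one_eq_nil (by omega)]
    rfl

theorem getInviter_changed : Claim_changed_getInviter := by
  unfold Claim_changed_getInviter; decide

theorem getInviter_tight : Claim_exact_getInviter := by
  intro n arr _ _ hD
  obtain ⟨x3, hx3b, x2, h23, y, hy2, hDy, hD23, hDrec⟩ := hD
  have hn2 : 2 ≤ n := by omega
  have hlen : ((PySem.List.pyRange 0 (n + 1) 1).map (pvVal arr)).length = (n + 1).toNat := by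
    rw [List.length_map, PySem.List.length_pyRange_one]; norm_num
  have hyl : y < ((PySem.List.pyRange 0 (n + 1) 1).map (pvVal arr)).length := by omega
  have h2l : x2 < ((PySem.List.pyRange 0 (n + 1) 1).map (pvVal arr)).length := by omega
  have h3l : x3 < ((PySem.List.pyRange 0 (n + 1) 1).map (pvVal arr)).length := by omega
  -- positive counts at y, x2, x3
  have hvy : 0 < pvVal arr (y : Int) := by
    by_contra h
    have h0 : pvG arr y = 0 := by unfold pvG; rw [if_neg h]
    omega
  have hg2pos : 0 < pvG arr x2 := by have := hDrec y hy2; omega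
  have hv2 : 0 < pvVal arr (x2 : Int) := by
    by_contra h
    have h0 : pvG arr x2 = 0 := by unfold pvG; rw [if_neg h]
    omega
  have hv3 : 0 < pvVal arr (x3 : Int) := by
    by_contra h
    have h0 : pvG arr x3 = 0 := by unfold pvG; rw [if_neg h]
    omega
  have hgy := pvG_dfn n arr y hyl hvy
  have hgx2 := pvG_dfn n arr x2 h2l hv2
  have hgx3 := pvG_dfn n arr x3 h3l hv3
  have hpy : pvPos ((PySem.List.pyRange 0 (n + 1) 1).map (pvVal arr)) y := by
    unfold pvPos; rw [vals_getD arr n y hyl]; exact hvy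
  have hp2 : pvPos ((PySem.List.pyRange 0 (n + 1) 1).map (pvVal arr)) x2 := by
    unfold pvPos; rw [vals_getD arr n x2 h2l]; exact hv2
  have hp3 : pvPos ((PySem.List.pyRange 0 (n + 1) 1).map (pvVal arr)) x3 := by
    unfold pvPos; rw [vals_getD arr n x3 h3l]; exact hv3
  have hdy : 0 < pvDfn ((PySem.List.pyRange 0 (n + 1) 1).map (pvVal arr)) y := by omega
  have hd23 : pvDfn ((PySem.List.pyRange 0 (n + 1) 1).map (pvVal arr)) x2 < pvDfn ((PySem.List.pyRange 0 (n + 1) 1).map (pvVal arr)) x3 := by omega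
  have hrec2 : ∀ w, w < x2 → pvPos ((PySem.List.pyRange 0 (n + 1) 1).map (pvVal arr)) w →
      pvDfn ((PySem.List.pyRange 0 (n + 1) 1).map (pvVal arr)) w < pvDfn ((PySem.List.pyRange 0 (n + 1) 1).map (pvVal arr)) x2 := by
    intro w hw hpw
    have hwl : w < ((PySem.List.pyRange 0 (n + 1) 1).map (pvVal arr)).length := by omega
    have hvw : 0 < pvVal arr (w : Int) := by
      unfold pvPos at hpw; rwa [vals_getD arr n w hwl] at hpw
    have hgw := pvG_dfn n arr w hwl hvw
    have := hDrec w hw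
    omega
  -- extract the first record (from y) and the third record (above x2's deficit, from x3)
  obtain ⟨r1, hr1y, hr1p, hr1d, hr1rec⟩ := exrec ((PySem.List.pyRange 0 (n + 1) 1).map (pvVal arr)) y 0 hpy hdy
  obtain ⟨r3, hr3x, hr3p, hr3d, hr3rec⟩ := exrec ((PySem.List.pyRange 0 (n + 1) 1).map (pvVal arr)) x3 (pvDfn ((PySem.List.pyRange 0 (n + 1) 1).map (pvVal arr)) x2) hp3 hd23
  have hr12 : r1 < x2 := by omega
  have h2r3 : x2 < r3 := by
    rcases Nat.lt_trichotomy r3 x2 with h | h | h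
    · have := hrec2 r3 h hr3p; omega
    · subst h; omega
    · exact h
  have hcnt3 : 3 ≤ pvCnt ((PySem.List.pyRange 0 (n + 1) 1).map (pvVal arr)) 0 0 0 := by
    have h0 : pvPsum ((PySem.List.pyRange 0 (n + 1) 1).map (pvVal arr)) 0 = 0 := rfl
    have := cnt3R ((PySem.List.pyRange 0 (n + 1) 1).map (pvVal arr)) ((PySem.List.pyRange 0 (n + 1) 1).map (pvVal arr)) 0 0 r1 x2 r3 rfl
      (Nat.zero_le _) hr12 h2r3 (by omega) hr1p hp2 hr3p (by omega) hr1rec hrec2 hr3rec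
    rw [h0] at this
    exact_mod_cast this
  obtain ⟨m, hm⟩ : ∃ m' : Nat, n + 1 = 0 + (m' : Int) := ⟨(n + 1).toNat, by omega⟩
  simp only [getInviter, getInviter_alt]
  rw [hm] at hcnt3 ⊢
  rw [bridgeA arr m 0 0 0]
  rw [prefList_spec, List.nil_append, bridgeB_fold]
  exact ne_of_lt (ltdiv _ 0 0 0 0 0 (Or.inl ⟨rfl, rfl, rfl⟩) (by omega))
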